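-- pv_equiv track=rewrite | github.com/ozan-k/deeperInference | SweepProof/strategy_di_maude_sample.py | build_normal
-- ===== SOURCE A (Python) =====
-- def build_normal(n):
-- 	lst = ['A','B','C','D','E','F','G','H','I','J']
-- 	result = ""
-- 	for i in range(n-1):
-- 		result = result + "{ [" + lst[i] + ",- " +lst[i] + "], "
-- 	result = result + " [" + lst[n-1] + ",- " +lst[n-1] + "] "
-- 	for i in range(n-1):
-- 		result = result + '} '
-- 	return result
-- ===== SOURCE B (Python) =====
-- def build_normal(n):
--     lst = ['A','B','C','D','E','F','G','H','I','J']
--     s = " [" + lst[n-1] + ",- " + lst[n-1] + "] "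
--     for i in range(n-2, -1, -1):
--         s = "{ [" + lst[i] + ",- " + lst[i] + "], " + s + "} "
--     return s
-- ===== Notes on version B (the rewrite author's own statement) =====
-- stated objective: simpler
-- what changed: Replaces A's two separate forward loops (one appending opens, one appending closes) plus a middle insertion with a single backward loop that wraps the middle term inside-out.
import Mathlib
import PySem

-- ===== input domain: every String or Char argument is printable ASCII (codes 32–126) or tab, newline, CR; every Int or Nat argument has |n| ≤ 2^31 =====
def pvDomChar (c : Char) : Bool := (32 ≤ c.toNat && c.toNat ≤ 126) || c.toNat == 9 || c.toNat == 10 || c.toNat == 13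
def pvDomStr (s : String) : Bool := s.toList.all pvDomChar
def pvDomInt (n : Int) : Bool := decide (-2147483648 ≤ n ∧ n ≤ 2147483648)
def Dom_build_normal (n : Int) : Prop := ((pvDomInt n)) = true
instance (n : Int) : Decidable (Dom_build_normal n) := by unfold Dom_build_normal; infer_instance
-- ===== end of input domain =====

-- B builds the same nested bracket string inside-out with ONE backward wrapping loop
-- instead of A's two forward loops; objective: simpler decomposition, same cost.

def pvLst : List String := ["A","B","C","D","E","F","G","H","I","J"]

-- ===== PORT A =====
-- two forward loops: opens then middle then closes; lst[i] = pyGetD (index always valid inside Pre_)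
def build_normal (n : Int) : String :=
  let result : String :=
    (PySem.List.pyRange 0 (n-1) 1).foldl
      (fun r i => r ++ "{ [" ++ PySem.List.pyGetD pvLst i "" ++ ",- " ++ PySem.List.pyGetD pvLst i "" ++ "], ") ""
  let result := result ++ " [" ++ PySem.List.pyGetD pvLst (n-1) "" ++ ",- " ++ PySem.List.pyGetD pvLst (n-1) "" ++ "] "
  (PySem.List.pyRange 0 (n-1) 1).foldl (fun r _ => r ++ "} ") result

-- ===== PORT B =====
-- single backward loop wrapping the middle term
def build_normal_alt (n : Int) : String :=
  let s : String := " [" ++ PySem.List.pyGetD pvLst (n-1) "" ++ ",- " ++ PySem.List.pyGetD pvLst (n-1) "" ++ "] "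
  (PySem.List.pyRange (n-2) (-1) (-1)).foldl
    (fun s i => "{ [" ++ PySem.List.pyGetD pvLst i "" ++ ",- " ++ PySem.List.pyGetD pvLst i "" ++ "], " ++ s ++ "} ") s

-- ===== PRECONDITION & SPEC =====
-- Pre_ excludes exactly the inputs where A raises IndexError (lst[n-1] or lst[i] out of range):
-- A returns normally precisely for -9 ≤ n ≤ 10.
def Pre_build_normal (n : Int) : Prop := -9 ≤ n ∧ n ≤ 10
instance (n : Int) : Decidable (Pre_build_normal n) := by unfold Pre_build_normal; infer_instance
def pvWitness_build_normal : Int := (4)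

def Spec_build_normal (n : Int) (out : String) : Prop := out = build_normal_alt n
instance (n : Int) (out : String) : Decidable (Spec_build_normal n out) := by unfold Spec_build_normal; infer_instance

-- ===== CLAIM (what is proved, stated in full; the proofs are below) =====
def Claim_equal_build_normal : Prop := ∀ (n : Int), Dom_build_normal n → Pre_build_normal n → Spec_build_normal n (build_normal n)

-- ===== LEMMAS AND PROOFS =====

-- ===== VERDICT (by name: the statement is the Claim_ definition above) =====
theorem build_normal_spec : Claim_equal_build_normal := by
  intro n _ hpre
  obtain ⟨h1, h2⟩ := hpre
  unfold Spec_build_normal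
  interval_cases n <;> rfl
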